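-- pv_equiv track=rewrite | github.com/sinryuji/algorithm | 프로그래머스/0/181932. 코드 처리하기/코드 처리하기.py | solution
-- ===== SOURCE A (Python) =====
-- def solution(code):
--     ret = ''
--     mode = 0
--     for i, c in enumerate(code):
--         if mode == 0:
--             if c == '1':
--                 mode = 1
--             elif i % 2 == 0:
--                 ret += c
--         else:
--             if c == '1':
--                 mode = 0
--             elif i % 2 != 0:
--                 ret += c
--     if not ret:
--         ret = "EMPTY"
--     return ret
-- ===== SOURCE B (Python) =====
-- def solution(code):
--     out = []
--     pos = 0
--     for k, seg in enumerate(code.split('1')):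
--         for j, c in enumerate(seg):
--             if (pos + j) % 2 == k % 2:
--                 out.append(c)
--         pos += len(seg) + 1
--     return ''.join(out) or "EMPTY"
-- ===== Notes on version B (the rewrite author's own statement) =====
-- stated objective: alternative
-- what changed: B splits the code on the mode-toggling '1' delimiters and filters each segment by global-index parity (segment index mod 2), instead of A's single stateful scan that toggles a mode flag per character.
import Mathlib
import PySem

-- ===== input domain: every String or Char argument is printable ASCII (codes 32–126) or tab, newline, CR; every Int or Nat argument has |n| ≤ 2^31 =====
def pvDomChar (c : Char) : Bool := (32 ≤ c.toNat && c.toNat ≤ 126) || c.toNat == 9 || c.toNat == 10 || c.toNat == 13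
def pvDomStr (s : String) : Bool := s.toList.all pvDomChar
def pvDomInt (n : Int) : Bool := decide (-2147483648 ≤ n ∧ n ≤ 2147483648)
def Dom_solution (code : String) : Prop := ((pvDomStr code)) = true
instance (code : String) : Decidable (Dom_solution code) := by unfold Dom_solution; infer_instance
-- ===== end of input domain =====

-- B restates A (one scan toggling a mode flag) as: split on the '1' delimiters and
-- filter segment k by global-index parity = k % 2 (objective: alternative decomposition).

-- ===== PORT A =====
-- exact hand port of enumerate(code): pairs (index, char) with indices 0,1,2,…
def pyEnum (i : Nat) : List Char → List (Nat × Char)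
  | [] => []
  | c :: cs => (i, c) :: pyEnum (i + 1) cs

-- A's for-loop: state (ret, mode), branches in A's order; ret += c is ret ++ [c]
def solLoopA : List (Nat × Char) → List Char → Nat → List Char
  | [], ret, _ => ret
  | (i, c) :: rest, ret, mode =>
    if mode == 0 then
      if c == '1' then solLoopA rest ret 1
      else if i % 2 == 0 then solLoopA rest (ret ++ [c]) mode
      else solLoopA rest ret mode
    else
      if c == '1' then solLoopA rest ret 0
      else if i % 2 != 0 then solLoopA rest (ret ++ [c]) mode
      else solLoopA rest ret mode

def solution (code : String) : String :=
  let ret := solLoopA (pyEnum 0 code.toList) [] 0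
  if ret = [] then "EMPTY" else String.mk ret

-- ===== PORT B =====
-- hand port of str.split('1') over the char list (exact for a one-char separator:
-- empty segments from leading/trailing/adjacent '1's are kept)
def split1 : List Char → List (List Char)
  | [] => [[]]
  | c :: cs =>
    if c = '1' then [] :: split1 cs
    else
      match split1 cs with
      | s :: rest => (c :: s) :: rest
      | [] => [[c]]   -- unreachable: split1 never returns []

-- inner loop of B: chars of a segment kept iff (pos + j) % 2 == k % 2
def pickSeg : List Char → Nat → Nat → List Char
  | [], _, _ => []
  | c :: cs, k, pos =>
    (if pos % 2 == k % 2 then [c] else []) ++ pickSeg cs k (pos + 1)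

-- outer loop of B over the segments, advancing pos by len(seg)+1
def bLoop : List (List Char) → Nat → Nat → List Char
  | [], _, _ => []
  | s :: rest, k, pos => pickSeg s k pos ++ bLoop rest (k + 1) (pos + s.length + 1)

def solution_alt (code : String) : String :=
  let out := bLoop (split1 code.toList) 0 0
  if out = [] then "EMPTY" else String.mk out

-- ===== PRECONDITION & SPEC =====
def Spec_solution (code : String) (out : String) : Prop := out = solution_alt code
instance (code : String) (out : String) : Decidable (Spec_solution code out) := by unfold Spec_solution; infer_instance

-- ===== CLAIM (what is proved, stated in full; the proofs are below) =====
def Claim_equal_solution : Prop := ∀ (code : String), Dom_solution code → Spec_solution code (solution code)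

-- ===== LEMMAS AND PROOFS =====

-- pickSeg only depends on k through k % 2
theorem pickSeg_parity (s : List Char) (k₁ k₂ pos : Nat) (h : k₁ % 2 = k₂ % 2) :
    pickSeg s k₁ pos = pickSeg s k₂ pos := by
  induction s generalizing pos with
  | nil => rfl
  | cons c cs ih => simp [pickSeg, h, ih]

-- bLoop only depends on k through k % 2
theorem bLoop_parity (segs : List (List Char)) (k₁ k₂ pos : Nat) (h : k₁ % 2 = k₂ % 2) :
    bLoop segs k₁ pos = bLoop segs k₂ pos := by
  induction segs generalizing k₁ k₂ pos with
  | nil => rfl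
  | cons s rest ih =>
      simp only [bLoop]
      rw [pickSeg_parity s k₁ k₂ pos h, ih (k₁ + 1) (k₂ + 1) _ (by omega)]

-- A's loop only appends on the right of the accumulator
theorem solLoopA_acc (l : List (Nat × Char)) (ret : List Char) (m : Nat) :
    solLoopA l ret m = ret ++ solLoopA l [] m := by
  induction l generalizing ret m with
  | nil => simp [solLoopA]
  | cons p rest ih =>
      obtain ⟨i, c⟩ := p
      simp only [solLoopA]
      split_ifs with h1 h2 h3 h2 h3 <;>
        simp [ih (ret ++ [c]), ih [c], ih ret, List.append_assoc]

-- core correspondence: A's scan of the rest of the string starting at index i in mode m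
-- equals B's processing of its split with segment parity m and offset i
theorem core (cs : List Char) (i m : Nat) (hm : m < 2) :
    solLoopA (pyEnum i cs) [] m = bLoop (split1 cs) m i := by
  induction cs generalizing i m with
  | nil => simp [pyEnum, solLoopA, split1, bLoop, pickSeg]
  | cons c cs ih =>
      by_cases hc : c = '1'
      · subst hc
        rw [show split1 ('1' :: cs) = [] :: split1 cs from by simp [split1]]
        interval_cases m
        · simp only [pyEnum, solLoopA, beq_self_eq_true, if_pos, bLoop, pickSeg,
            List.nil_append, List.length_nil, Nat.add_zero]
          exact ih (i + 1) 1 (by omega)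
        · simp only [pyEnum, solLoopA, show ((1 : Nat) == 0) = false by rfl,
            Bool.false_eq_true, if_false, beq_self_eq_true, if_pos, bLoop, pickSeg,
            List.nil_append, List.length_nil, Nat.add_zero]
          rw [ih (i + 1) 0 (by omega)]
          exact bLoop_parity _ 0 (1 + 1) _ (by omega)
      · have hsplit := split1_ne_nil cs
        obtain ⟨s, rest, hsr⟩ : ∃ s rest, split1 cs = s :: rest := by
          cases h : split1 cs with
          | nil => exact absurd h hsplit
          | cons s rest => exact ⟨s, rest, rfl⟩
        have hsplit1 : split1 (c :: cs) = (c :: s) :: rest := by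
          simp only [split1, if_neg hc, hsr]
        rw [hsplit1]
        have hB : bLoop ((c :: s) :: rest) m i
            = (if i % 2 == m % 2 then [c] else []) ++ bLoop (split1 cs) m (i + 1) := by
          simp only [bLoop, pickSeg, hsr, List.length_cons, List.append_assoc]
          rw [show i + (s.length + 1) + 1 = i + 1 + s.length + 1 from by omega]
        rw [hB]
        have hcb : (c == '1') = false := by simp [hc]
        simp only [pyEnum, solLoopA, hcb]
        interval_cases m
        · simp only [beq_self_eq_true, if_pos, Bool.false_eq_true, if_false, Nat.zero_mod]
          by_cases hp : i % 2 = 0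
          · simp only [hp, beq_self_eq_true, if_pos, List.nil_append]
            rw [solLoopA_acc _ [c] 0, ih (i + 1) 0 (by omega)]
          · have : (i % 2 == 0) = false := by simp [hp]
            simp only [this, Bool.false_eq_true, if_false, List.nil_append]
            exact ih (i + 1) 0 (by omega)
        · simp only [show ((1 : Nat) == 0) = false by rfl, Bool.false_eq_true, if_false]
          have h12 : (1 : Nat) % 2 = 1 := by omega
          by_cases hp : i % 2 = 0
          · have h1 : (i % 2 != 0) = false := by simp [hp]
            have h2 : (i % 2 == 1 % 2) = false := by simp [hp, h12]
            simp only [h1, h2, Bool.false_eq_true, if_false, List.nil_append]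
            exact ih (i + 1) 1 (by omega)
          · have hp1 : i % 2 = 1 := by omega
            have h1 : (i % 2 != 0) = true := by simp [hp1]
            have h2 : (i % 2 == 1 % 2) = true := by simp [hp1, h12]
            simp only [h1, h2, if_pos, List.nil_append]
            rw [solLoopA_acc _ [c] 1, ih (i + 1) 1 (by omega)]
  where
    split1_ne_nil (cs : List Char) : split1 cs ≠ [] := by
      cases cs with
      | nil => simp [split1]
      | cons c cs =>
          simp only [split1]
          split
          · simp
          · cases h : split1 cs <;> simp

-- ===== VERDICT (by name: the statement is the Claim_ definition above) =====
theorem solution_spec : Claim_equal_solution := by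
  intro code _
  unfold Spec_solution solution solution_alt
  rw [core code.toList 0 0 (by omega)]
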